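-- pv_equiv track=rewrite | github.com/dbizzaro/WFOMC-beyond-FOL | experiments_solutions.py | solution_DAGs_k_edges_one_source
-- ===== SOURCE A (Python) =====
-- def solution_DAGs_k_edges_one_source(n, k):
--   #https://oeis.org/A350487
--   solutions = [	1, 0, 2, 0, 0, 9, 6, 0, 0, 0, 64, 132, 96, 24, 0, 0, 0, 0,
--                 625, 2640, 4850, 4900, 2850, 900, 120, 0, 0, 0, 0, 0, 7776, 55800,
--                 186480, 379170, 516660, 491040, 328680, 152640, 46980, 8640, 720,
--                 0, 0, 0, 0, 0, 0, 117649, 1286670, 6756120, 22466010]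
--   if k > n*(n-1)//2:
--     return 0
--   sum_ = 0
--   for n_prime in range(1, n):
--     sum_ += n_prime * (n_prime-1) //2  +1
--   return solutions[sum_ + k]
-- ===== SOURCE B (Python) =====
-- def solution_DAGs_k_edges_one_source(n, k):
--   #https://oeis.org/A350487
--   solutions = [	1, 0, 2, 0, 0, 9, 6, 0, 0, 0, 64, 132, 96, 24, 0, 0, 0, 0,
--                 625, 2640, 4850, 4900, 2850, 900, 120, 0, 0, 0, 0, 0, 7776, 55800,
--                 186480, 379170, 516660, 491040, 328680, 152640, 46980, 8640, 720,
--                 0, 0, 0, 0, 0, 0, 117649, 1286670, 6756120, 22466010]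
--   if k > n*(n-1)//2:
--     return 0
--   # closed form for the loop sum: (n-1) + C(n,3), empty sum for n <= 1
--   offset = (n-1) + n*(n-1)*(n-2)//6 if n >= 2 else 0
--   return solutions[offset + k]
-- ===== Notes on version B (the rewrite author's own statement) =====
-- stated objective: simpler
-- what changed: The offset-accumulation loop over range(1, n) is replaced by the closed form (n-1) + n*(n-1)*(n-2)//6 (hockey-stick identity), computed directly; guard and table lookup unchanged.
import Mathlib
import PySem

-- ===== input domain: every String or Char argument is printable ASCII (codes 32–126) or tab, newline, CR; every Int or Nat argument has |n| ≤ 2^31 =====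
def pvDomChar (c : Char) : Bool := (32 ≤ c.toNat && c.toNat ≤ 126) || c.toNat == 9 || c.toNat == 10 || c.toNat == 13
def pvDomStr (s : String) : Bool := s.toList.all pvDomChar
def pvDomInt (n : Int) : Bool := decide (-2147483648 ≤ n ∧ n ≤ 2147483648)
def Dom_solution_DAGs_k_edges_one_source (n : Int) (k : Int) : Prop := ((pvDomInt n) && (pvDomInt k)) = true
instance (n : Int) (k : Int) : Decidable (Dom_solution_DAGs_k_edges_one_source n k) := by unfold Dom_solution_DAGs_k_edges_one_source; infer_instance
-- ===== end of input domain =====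

-- B replaces A's offset-accumulation loop by the closed form (n-1) + C(n,3) (hockey-stick identity); objective: simpler.


def pvSolutionsTable : List Int := [1, 0, 2, 0, 0, 9, 6, 0, 0, 0, 64, 132, 96, 24, 0, 0, 0, 0,
  625, 2640, 4850, 4900, 2850, 900, 120, 0, 0, 0, 0, 0, 7776, 55800,
  186480, 379170, 516660, 491040, 328680, 152640, 46980, 8640, 720,
  0, 0, 0, 0, 0, 0, 117649, 1286670, 6756120, 22466010]

-- ===== PORT A =====
-- literal port of A: guard, then the accumulation loop over range(1, n), then the table lookup.
-- Python raises IndexError where pyGet? is none; those inputs are excluded by Pre_ (getD 0 is never the value claimed).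
def solution_DAGs_k_edges_one_source (n : Int) (k : Int) : Int :=
  if k > PySem.Int.floordiv (n * (n - 1)) 2 then 0
  else
    let sum_ : Int := (PySem.List.pyRange 1 n 1).foldl
      (fun s n_prime => s + (PySem.Int.floordiv (n_prime * (n_prime - 1)) 2 + 1)) 0
    (PySem.List.pyGet? pvSolutionsTable (sum_ + k)).getD 0

-- ===== PORT B =====
-- closed-form offset used by B (and by Pre_ to describe the table index)
def pvClosedOffset (n : Int) : Int :=
  if 2 ≤ n then (n - 1) + PySem.Int.floordiv (n * (n - 1) * (n - 2)) 6 else 0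

def solution_DAGs_k_edges_one_source_alt (n : Int) (k : Int) : Int :=
  if k > PySem.Int.floordiv (n * (n - 1)) 2 then 0
  else (PySem.List.pyGet? pvSolutionsTable (pvClosedOffset n + k)).getD 0

-- ===== PRECONDITION & SPEC =====
-- Pre_ excludes exactly the inputs on which A raises IndexError: guard false and table index outside
-- Python's valid range -50 ≤ offset+k < 50 for the 50-entry table.
def Pre_solution_DAGs_k_edges_one_source (n : Int) (k : Int) : Prop :=
  k > PySem.Int.floordiv (n * (n - 1)) 2 ∨
    (-50 ≤ pvClosedOffset n + k ∧ pvClosedOffset n + k < 50)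
instance (n : Int) (k : Int) : Decidable (Pre_solution_DAGs_k_edges_one_source n k) := by unfold Pre_solution_DAGs_k_edges_one_source; infer_instance

def pvWitness_solution_DAGs_k_edges_one_source : Int × Int := (4, 2)

def Spec_solution_DAGs_k_edges_one_source (n : Int) (k : Int) (out : Int) : Prop := out = solution_DAGs_k_edges_one_source_alt n k
instance (n : Int) (k : Int) (out : Int) : Decidable (Spec_solution_DAGs_k_edges_one_source n k out) := by unfold Spec_solution_DAGs_k_edges_one_source; infer_instance

-- ===== CLAIM (what is proved, stated in full; the proofs are below) =====
def Claim_equal_solution_DAGs_k_edges_one_source : Prop := ∀ (n : Int) (k : Int), Dom_solution_DAGs_k_edges_one_source n k → Pre_solution_DAGs_k_edges_one_source n k → Spec_solution_DAGs_k_edges_one_source n k (solution_DAGs_k_edges_one_source n k)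

-- ===== LEMMAS AND PROOFS =====

-- running value of A's loop after the first m iterations
def pvF : Nat → Int
  | 0 => 0
  | m + 1 => pvF m + (((m + 1).choose 2 : Nat) : Int) + 1

theorem pvFloordiv_natCast_two (x : Nat) :
    PySem.Int.floordiv (x : Int) 2 = ((x / 2 : Nat) : Int) := by
  simp [PySem.Int.floordiv, Int.fdiv_eq_ediv]

theorem pvFloordiv_natCast_six (x : Nat) :
    PySem.Int.floordiv (x : Int) 6 = ((x / 6 : Nat) : Int) := by
  simp [PySem.Int.floordiv, Int.fdiv_eq_ediv]

theorem pvLoop_eq_F (m : Nat) (s : Int) :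
    ((List.range m).map (fun j : Nat => (1 : Int) + (j : Int))).foldl
      (fun s n_prime => s + (PySem.Int.floordiv (n_prime * (n_prime - 1)) 2 + 1)) s
      = s + pvF m := by
  induction m generalizing s with
  | zero => simp [pvF]
  | succ m ih =>
    rw [List.range_succ, List.map_append, List.foldl_append, ih]
    have h1 : ((1 : Int) + m) * ((1 : Int) + m - 1) = (((m + 1) * m : Nat) : Int) := by
      push_cast; ring
    simp only [List.map_cons, List.map_nil, List.foldl_cons, List.foldl_nil, h1,
      pvFloordiv_natCast_two, pvF]
    have h2 : (m + 1).choose 2 = (m + 1) * m / 2 := by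
      rw [Nat.choose_two_right]; simp
    rw [h2]; ring

theorem pvF_closed (m : Nat) : pvF m = (m : Int) + (((m + 1).choose 3 : Nat) : Int) := by
  induction m with
  | zero => simp [pvF]
  | succ m ih =>
    rw [pvF, ih]
    have : (m + 2).choose 3 = (m + 1).choose 3 + (m + 1).choose 2 := by
      rw [Nat.choose_succ_succ' (m + 1) 2]
      norm_num
      omega
    push_cast [this]
    ring

theorem pvOffset_eq (n : Int) :
    (PySem.List.pyRange 1 n 1).foldl
      (fun s n_prime => s + (PySem.Int.floordiv (n_prime * (n_prime - 1)) 2 + 1)) 0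
      = pvClosedOffset n := by
  rw [PySem.List.pyRange_one, pvLoop_eq_F, pvF_closed, pvClosedOffset]
  by_cases h : 2 ≤ n
  · rw [if_pos h]
    set m : Nat := (n - 1).toNat with hm
    have hn : n = (m : Int) + 1 := by omega
    have hm1 : 1 ≤ m := by omega
    have hprod : n * (n - 1) * (n - 2) = (((m + 1) * m * (m - 1) : Nat) : Int) := by
      push_cast [hm1]; rw [hn]; ring
    have hdesc : (m + 1) * m * (m - 1) = 6 * (m + 1).choose 3 := by
      have h1 : (m + 1).descFactorial 3 = (m + 1) * m * (m - 1) := by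
        simp [Nat.descFactorial]; ring
      have h2 : (m + 1).descFactorial 3 = 6 * (m + 1).choose 3 := by
        rw [Nat.descFactorial_eq_factorial_mul_choose]; norm_num [Nat.factorial]
      omega
    rw [hprod, pvFloordiv_natCast_six, hdesc]
    have : 6 * (m + 1).choose 3 / 6 = (m + 1).choose 3 := by omega
    rw [this]
    omega
  · rw [if_neg h]
    have : (n - 1).toNat = 0 := by omega
    simp [this]

-- ===== VERDICT (by name: the statement is the Claim_ definition above) =====
theorem solution_DAGs_k_edges_one_source_spec : Claim_equal_solution_DAGs_k_edges_one_source := by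
  intro n k _ _
  unfold Spec_solution_DAGs_k_edges_one_source solution_DAGs_k_edges_one_source solution_DAGs_k_edges_one_source_alt
  by_cases h : PySem.Int.floordiv (n * (n - 1)) 2 < k
  · simp only [gt_iff_lt, if_pos h]
  · simp only [gt_iff_lt, if_neg h]
    rw [pvOffset_eq]
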